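-- pv_equiv track=rewrite | github.com/Mo0dy/dice-web | runtime/lexer.py | _indent_width
-- ===== SOURCE A (Python) =====
-- def _indent_width(text):
--     width = 0
--     for char in text:
--         if char == "\t":
--             width += 4 - (width % 4)
--         else:
--             width += 1
--     return width
-- ===== SOURCE B (Python) =====
-- def _indent_width(text):
--     parts = text.split('\t')
--     width = len(parts[0])
--     for part in parts[1:]:
--         width += 4 - (width % 4)
--         width += len(part)
--     return width
-- ===== Notes on version B (the rewrite author's own statement) =====
-- stated objective: faster
-- what changed: B splits the string on tabs once and processes whole tab-delimited segments by their length (one tab-snap per segment boundary), instead of A's per-character Python loop with a branch on every character; segment work is done by C-level str.split/len.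
import Mathlib
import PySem

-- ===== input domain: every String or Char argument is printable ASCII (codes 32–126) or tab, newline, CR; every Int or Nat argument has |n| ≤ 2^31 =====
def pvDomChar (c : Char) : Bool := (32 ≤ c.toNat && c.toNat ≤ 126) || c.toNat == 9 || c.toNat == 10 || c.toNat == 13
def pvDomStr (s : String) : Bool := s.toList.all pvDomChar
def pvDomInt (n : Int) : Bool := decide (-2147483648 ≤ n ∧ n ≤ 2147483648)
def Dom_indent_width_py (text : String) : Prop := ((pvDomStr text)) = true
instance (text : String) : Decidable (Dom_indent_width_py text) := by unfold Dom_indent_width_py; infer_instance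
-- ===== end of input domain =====

-- B computes the same tab-expanded indentation width by splitting the string on '\t' and
-- adding whole segment lengths between tab-snaps, instead of stepping through every character; measured faster by a constant factor (C-level split/len vs per-char loop).


-- ===== PORT A =====
-- A's loop body: snap to the next multiple of 4 on a tab, else add 1
def indentStepA (width : Int) (char : Char) : Int :=
  if char == '\t' then width + (4 - PySem.Int.mod width 4) else width + 1

def indent_width_py (text : String) : Int :=
  text.toList.foldl indentStepA 0

-- ===== PORT B =====
-- B's loop body: one tab-snap for the tab preceding the part, then the part's length
def indentStepB (width : Int) (part : List Char) : Int :=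
  width + (4 - PySem.Int.mod width 4) + (part.length : Int)

def indent_width_py_alt (text : String) : Int :=
  match PySem.Chars.splitOn text.toList ['\t'] with
  | [] => 0   -- unreachable: split always yields at least one part (totality guard for the match)
  | p :: rest => rest.foldl indentStepB (p.length : Int)

-- ===== PRECONDITION & SPEC =====
def Spec_indent_width_py (text : String) (out : Int) : Prop := out = indent_width_py_alt text
instance (text : String) (out : Int) : Decidable (Spec_indent_width_py text out) := by unfold Spec_indent_width_py; infer_instance

-- ===== CLAIM (what is proved, stated in full; the proofs are below) =====
def Claim_equal_indent_width_py : Prop := ∀ (text : String), Dom_indent_width_py text → Spec_indent_width_py text (indent_width_py text)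

-- ===== LEMMAS AND PROOFS =====

lemma go_tab (fuel : Nat) (rest cur : List Char) (acc : List (List Char)) :
    PySem.Chars.splitOn.go ['\t'] (fuel+1) ('\t'::rest) cur acc
      = PySem.Chars.splitOn.go ['\t'] fuel rest [] (cur.reverse :: acc) := by
  simp [PySem.Chars.splitOn.go, List.isPrefixOf]

lemma go_notab (fuel : Nat) (c : Char) (rest cur : List Char) (acc : List (List Char)) (h : ¬ c = '\t') :
    PySem.Chars.splitOn.go ['\t'] (fuel+1) (c::rest) cur acc
      = PySem.Chars.splitOn.go ['\t'] fuel rest (c::cur) acc := by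
  have h' : ('\t' = c) = False := by simp [eq_comm, h]
  simp [PySem.Chars.splitOn.go, List.isPrefixOf, h']

lemma go_ne_nil (fuel : Nat) (l cur : List Char) (acc : List (List Char)) :
    PySem.Chars.splitOn.go ['\t'] fuel l cur acc ≠ [] := by
  induction fuel generalizing l cur acc with
  | zero => simp [PySem.Chars.splitOn.go]
  | succ fuel ih =>
    cases l with
    | nil => simp [PySem.Chars.splitOn.go]
    | cons c rest =>
      by_cases h : c = '\t'
      · subst h; rw [go_tab]; exact ih _ _ _
      · rw [go_notab _ _ _ _ _ h]; exact ih _ _ _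

lemma go_acc (fuel : Nat) (l cur : List Char) (acc : List (List Char)) :
    PySem.Chars.splitOn.go ['\t'] fuel l cur acc
      = acc.reverse ++ PySem.Chars.splitOn.go ['\t'] fuel l cur [] := by
  induction fuel generalizing l cur acc with
  | zero => simp [PySem.Chars.splitOn.go]
  | succ fuel ih =>
    cases l with
    | nil => simp [PySem.Chars.splitOn.go]
    | cons c rest =>
      by_cases h : c = '\t'
      · subst h
        rw [go_tab, go_tab, ih rest [] (cur.reverse :: acc), ih rest [] [cur.reverse]]
        simp
      · rw [go_notab _ _ _ _ _ h, go_notab _ _ _ _ _ h]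
        exact ih rest (c::cur) acc

-- invariant: A's character fold from width w0 + |cur| equals B's segment fold over what go returns
lemma go_main (fuel : Nat) (l cur : List Char) (w0 : Int) (hf : l.length ≤ fuel) :
    l.foldl indentStepA (w0 + (cur.length : Int))
      = match PySem.Chars.splitOn.go ['\t'] fuel l cur [] with
        | [] => 0
        | p :: rest => rest.foldl indentStepB (w0 + (p.length : Int)) := by
  induction fuel generalizing l cur w0 with
  | zero =>
    have : l = [] := by cases l <;> simp_all
    subst this
    simp [PySem.Chars.splitOn.go]
  | succ fuel ih =>
    cases l with
    | nil => simp [PySem.Chars.splitOn.go]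
    | cons c rest =>
      simp only [List.length_cons, Nat.add_le_add_iff_right] at hf
      by_cases h : c = '\t'
      · subst h
        rw [go_tab, go_acc fuel rest [] [cur.reverse]]
        have hrec := ih rest [] (w0 + cur.length + (4 - PySem.Int.mod (w0 + cur.length) 4)) hf
        simp only [List.length_nil, Int.natCast_zero, add_zero] at hrec
        cases hq : PySem.Chars.splitOn.go ['\t'] fuel rest [] [] with
        | nil => exact absurd hq (go_ne_nil _ _ _ _)
        | cons q qs =>
          simp only [hq] at hrec
          simp only [List.reverse_singleton, List.singleton_append, List.foldl_cons]
          have hfa : indentStepA (w0 + (cur.length:Int)) '\t'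
              = w0 + cur.length + (4 - PySem.Int.mod (w0 + cur.length) 4) := by simp [indentStepA]
          rw [hfa, hrec]
          have hfb : indentStepB (w0 + (cur.reverse.length : Int)) q
              = w0 + cur.length + (4 - PySem.Int.mod (w0 + cur.length) 4) + q.length := by
            simp [indentStepB, List.length_reverse]
          rw [hfb]
      · rw [go_notab _ _ _ _ _ h]
        have hrec := ih rest (c::cur) w0 hf
        simp only [List.foldl_cons]
        have hfa : indentStepA (w0 + (cur.length:Int)) c = w0 + ((c::cur).length : Int) := by
          simp [indentStepA, h]; ring
        rw [hfa]
        exact hrec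

-- ===== VERDICT (by name: the statement is the Claim_ definition above) =====
theorem indent_width_py_spec : Claim_equal_indent_width_py := by
  intro text _
  unfold Spec_indent_width_py indent_width_py indent_width_py_alt PySem.Chars.splitOn
  have h := go_main (text.toList.length + 1) text.toList [] 0 (by omega)
  simpa using h
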